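-- pv_equiv track=rewrite | github.com/ZacharMarek/1zadanie_ps | tcp_server.py | metoda
-- ===== SOURCE A (Python) =====
-- def metoda(hl):
--     s_cislo=100
--     s_txt="OK"
--     for i in hl:
--         if hl[i]=="":
--             s_cislo,s_txt=(200,'Bad request.')
--         if i=="":
--             s_cislo,s_txt=(200,'Bad request.')
--         if s_cislo==200:
--             return s_cislo,s_txt
--     return s_cislo,s_txt
-- ===== SOURCE B (Python) =====
-- def metoda(hl):
--     shortest = min((min(len(k), len(v)) for k, v in hl.items()), default=1)
--     return (200, 'Bad request.') if shortest == 0 else (100, 'OK')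
-- ===== Notes on version B (the rewrite author's own statement) =====
-- stated objective: alternative
-- what changed: Replaced A's stateful loop with per-key dict lookup hl[i] and early return by an arithmetic aggregate: the minimum key/value length over the dict (default 1) is computed once and compared to 0; Pre_ excludes association lists with duplicate keys, which cannot arise from a Python dict and on which A's first-match lookup order is accidental.
import Mathlib
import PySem

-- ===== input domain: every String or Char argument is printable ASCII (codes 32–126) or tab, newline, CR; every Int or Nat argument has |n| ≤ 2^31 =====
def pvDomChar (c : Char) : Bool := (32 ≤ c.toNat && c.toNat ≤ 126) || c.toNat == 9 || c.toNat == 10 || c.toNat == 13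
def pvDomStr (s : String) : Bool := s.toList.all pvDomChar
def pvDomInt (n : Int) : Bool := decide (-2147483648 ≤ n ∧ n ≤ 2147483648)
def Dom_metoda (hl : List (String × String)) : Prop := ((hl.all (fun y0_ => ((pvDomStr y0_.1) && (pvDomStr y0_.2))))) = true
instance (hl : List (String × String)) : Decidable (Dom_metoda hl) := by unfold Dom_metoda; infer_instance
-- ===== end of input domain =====

-- ===== PORT A =====
-- B replaces A's stateful loop (dict lookup hl[i] + early return) by one aggregate:
-- the minimum key/value length, compared to 0 ('alternative' objective, same cost).
-- First-match lookup on the association list = Python's dict lookup hl[i].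
def metodaGo (hl : List (String × String)) (s : Int × String) :
    List (String × String) → Int × String
  | [] => s
  | (i, _) :: rest =>
    -- if hl[i]=="": state := (200,'Bad request.')
    let s1 := if (PySem.Dict.mk hl).get? i = some "" then ((200 : Int), "Bad request.") else s
    -- if i=="": state := (200,'Bad request.')
    let s2 := if i = "" then ((200 : Int), "Bad request.") else s1
    -- if s_cislo==200: return
    if s2.1 = 200 then s2 else metodaGo hl s2 rest

def metoda (hl : List (String × String)) : Int × String :=
  metodaGo hl ((100 : Int), "OK") hl

-- ===== PORT B =====
-- min((min(len(k), len(v)) for k, v in hl.items()), default=1)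
def metoda_alt (hl : List (String × String)) : Int × String :=
  let lens := hl.map (fun p => min (PySem.Str.len p.1) (PySem.Str.len p.2))
  let shortest : Int := match lens with | [] => 1 | x :: xs => xs.foldl min x
  if shortest = 0 then ((200 : Int), "Bad request.") else ((100 : Int), "OK")

-- ===== PRECONDITION & SPEC =====
-- Pre_ excludes association lists with duplicate keys: a Python dict cannot contain
-- them, and on such lists A's first-match lookup order is accidental.
def Pre_metoda (hl : List (String × String)) : Prop := (hl.map Prod.fst).Nodup
instance (hl : List (String × String)) : Decidable (Pre_metoda hl) := by
  unfold Pre_metoda; infer_instance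
def pvWitness_metoda : (List (String × String)) := [("a", "1"), ("b", "2")]
def Spec_metoda (hl : List (String × String)) (out : Int × String) : Prop := out = metoda_alt hl
instance (hl : List (String × String)) (out : Int × String) : Decidable (Spec_metoda hl out) := by unfold Spec_metoda; infer_instance

-- ===== CLAIM (what is proved, stated in full; the proofs are below) =====
def Claim_equal_metoda : Prop := ∀ (hl : List (String × String)), Dom_metoda hl → Pre_metoda hl → Spec_metoda hl (metoda hl)

-- ===== LEMMAS AND PROOFS =====
theorem get?_of_mem_nodup (hl : List (String × String)) (i : String) (v : String)
    (hnd : (hl.map Prod.fst).Nodup) (hm : (i, v) ∈ hl) :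
    (PySem.Dict.mk hl).get? i = some v := by
  induction hl with
  | nil => cases hm
  | cons p rest ih =>
    obtain ⟨k, w⟩ := p
    simp only [List.map_cons, List.nodup_cons] at hnd
    rw [PySem.Dict.get?_mk_cons]
    rcases List.mem_cons.mp hm with h | h
    · cases h; simp
    · have hne : ¬ (k == i) = true := by
        intro hkeq
        exact hnd.1 (by
          have : k = i := by simpa using hkeq
          subst this
          exact List.mem_map.mpr ⟨(k, v), h, rfl⟩)
      rw [if_neg hne]
      exact ih hnd.2 h

-- A's loop computes 'is there an empty key or an empty value?'
theorem metodaGo_eq (hl : List (String × String)) (l : List (String × String))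
    (h : ∀ p ∈ l, (PySem.Dict.mk hl).get? p.1 = some p.2) :
    metodaGo hl ((100 : Int), "OK") l =
      if l.any (fun p => p.1 == "" || p.2 == "") then ((200 : Int), "Bad request.")
      else ((100 : Int), "OK") := by
  induction l with
  | nil => simp [metodaGo]
  | cons p rest ih =>
    obtain ⟨i, v⟩ := p
    have hget : (PySem.Dict.mk hl).get? i = some v := h (i, v) (List.mem_cons_self)
    have hrest := ih (fun q hq => h q (List.mem_cons_of_mem _ hq))
    by_cases hv : v = ""
    · subst hv
      simp [metodaGo, hget]
    · by_cases hi : i = ""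
      · subst hi
        simp [metodaGo]
      · have h1 : (i == "") = false := by simp [hi]
        have h2 : (v == "") = false := by simp [hv]
        have hany : (((i, v) :: rest).any fun p => p.1 == "" || p.2 == "") =
            (rest.any fun p => p.1 == "" || p.2 == "") := by
          simp [List.any_cons, h1, h2]
        simp only [metodaGo, hget, hany]
        rw [if_neg hi, if_neg (show ¬ (some v = some "") by simp [hv])]
        simp [hrest]

theorem len_eq_zero_iff (s : String) : PySem.Str.len s = 0 ↔ s = "" := by
  rw [PySem.Str.len_eq]
  constructor
  · intro h
    have h0 : s.toList = [] := List.eq_nil_of_length_eq_zero (by exact_mod_cast h)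
    rw [← String.ofList_toList (s := s), h0]
  · intro h; subst h; rfl

theorem len_nonneg (s : String) : 0 ≤ PySem.Str.len s := by
  rw [PySem.Str.len_eq]; exact_mod_cast Nat.zero_le _

-- a fold of 'min' over nonnegative ints hits 0 iff the start or some element is 0
theorem foldl_min_eq_zero (xs : List Int) (a : Int) (ha : 0 ≤ a)
    (hxs : ∀ y ∈ xs, 0 ≤ y) :
    (xs.foldl min a = 0 ↔ (a = 0 ∨ ∃ y ∈ xs, y = 0)) := by
  induction xs generalizing a with
  | nil => simp
  | cons x rest ih =>
    have hx : 0 ≤ x := hxs x (List.mem_cons_self)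
    have := ih (min a x) (le_min ha hx) (fun y hy => hxs y (List.mem_cons_of_mem _ hy))
    simp only [List.foldl_cons, this]
    constructor
    · rintro (hm | hy)
      · rcases min_eq_iff.mp hm with ⟨h0, _⟩ | ⟨h0, _⟩
        · exact Or.inl h0
        · exact Or.inr ⟨x, List.mem_cons_self, h0⟩
      · obtain ⟨y, hy, h0⟩ := hy
        exact Or.inr ⟨y, List.mem_cons_of_mem _ hy, h0⟩
    · rintro (h0 | ⟨y, hy, h0⟩)
      · exact Or.inl (by subst h0; exact min_eq_left hx)
      · rcases List.mem_cons.mp hy with h | h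
        · subst h; exact Or.inl (by subst h0; exact min_eq_right ha)
        · exact Or.inr ⟨y, h, h0⟩

-- B computes the same boolean through the length minimum
theorem metoda_alt_eq (hl : List (String × String)) :
    metoda_alt hl =
      if hl.any (fun p => p.1 == "" || p.2 == "") then ((200 : Int), "Bad request.")
      else ((100 : Int), "OK") := by
  unfold metoda_alt
  cases hl with
  | nil => simp
  | cons p rest =>
    simp only [List.map_cons]
    have hz : (rest.map (fun p => min (PySem.Str.len p.1) (PySem.Str.len p.2))).foldl min
          (min (PySem.Str.len p.1) (PySem.Str.len p.2)) = 0 ↔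
        ((p :: rest).any (fun p => p.1 == "" || p.2 == "")) = true := by
      rw [foldl_min_eq_zero _ _ (le_min (len_nonneg _) (len_nonneg _))
        (by rintro y hy; obtain ⟨q, hq, rfl⟩ := List.mem_map.mp hy
            exact le_min (len_nonneg _) (len_nonneg _))]
      simp only [List.any_cons, List.mem_map, Bool.or_eq_true, List.any_eq_true]
      constructor
      · rintro (h0 | ⟨y, ⟨q, hq, rfl⟩, h0⟩)
        · rcases min_eq_iff.mp h0 with ⟨h, _⟩ | ⟨h, _⟩
          · exact Or.inl (Or.inl (by simp [(len_eq_zero_iff _).mp h]))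
          · exact Or.inl (Or.inr (by simp [(len_eq_zero_iff _).mp h]))
        · rcases min_eq_iff.mp h0 with ⟨h, _⟩ | ⟨h, _⟩
          · exact Or.inr ⟨q, hq, Or.inl (by simp [(len_eq_zero_iff _).mp h])⟩
          · exact Or.inr ⟨q, hq, Or.inr (by simp [(len_eq_zero_iff _).mp h])⟩
      · have lmin0 : ∀ (a b : String), a = "" ∨ b = "" →
            min (PySem.Str.len a) (PySem.Str.len b) = 0 := by
          rintro a b (rfl | rfl)
          · exact le_antisymm (min_le_left _ _) (le_min (le_refl 0) (len_nonneg _))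
          · exact le_antisymm (min_le_right _ _) (le_min (len_nonneg _) (le_refl 0))
        rintro (h | ⟨q, hq, h⟩)
        · exact Or.inl (lmin0 _ _ (Or.imp (fun h => by simpa using h) (fun h => by simpa using h) h))
        · exact Or.inr ⟨_, ⟨q, hq, rfl⟩, lmin0 _ _ (Or.imp (fun h => by simpa using h) (fun h => by simpa using h) h)⟩
    by_cases hb : ((p :: rest).any (fun p => p.1 == "" || p.2 == "")) = true
    · rw [if_pos (hz.mpr hb), if_pos hb]
    · rw [if_neg (fun h => hb (hz.mp h)), if_neg hb]

-- ===== VERDICT (by name: the statement is the Claim_ definition above) =====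
theorem metoda_spec : Claim_equal_metoda := by
  intro hl _ hpre
  unfold Spec_metoda metoda
  rw [metodaGo_eq hl hl (fun p hp => get?_of_mem_nodup hl p.1 p.2 hpre hp)]
  rw [metoda_alt_eq]
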